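-- pv_equiv track=rewrite | github.com/ShangQingTu/XAlias | demo/coref/resolution.py | restrict_length
-- ===== SOURCE A (Python) =====
-- def restrict_length(_text, max_len=512):
--     sentences = _text.split("::;")
--     final_text = ""
--     total_len = 0
--     for sentence in sentences:
--         sent_len = len(sentence.split())
--         total_len += sent_len
--         if total_len > max_len:
--             break
--         final_text += sentence + ' '
--     return final_text.strip()
-- ===== SOURCE B (Python) =====
-- def restrict_length(_text, max_len=512):
--     sentences = _text.split("::;")
--     counts = [len(s.split()) for s in sentences]
--     sums = []
--     run = 0
--     for c in counts:
--         run += c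
--         sums.append(run)
--     i = next((k for k, t in enumerate(sums) if t > max_len), len(sentences))
--     return ' '.join(sentences[:i]).strip()
-- ===== Notes on version B (the rewrite author's own statement) =====
-- stated objective: alternative
-- what changed: Builds a word-count table and its prefix sums first, finds the cutoff index, then produces the result with a single slice+join, instead of concatenating while scanning with an in-loop break.
import Mathlib
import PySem

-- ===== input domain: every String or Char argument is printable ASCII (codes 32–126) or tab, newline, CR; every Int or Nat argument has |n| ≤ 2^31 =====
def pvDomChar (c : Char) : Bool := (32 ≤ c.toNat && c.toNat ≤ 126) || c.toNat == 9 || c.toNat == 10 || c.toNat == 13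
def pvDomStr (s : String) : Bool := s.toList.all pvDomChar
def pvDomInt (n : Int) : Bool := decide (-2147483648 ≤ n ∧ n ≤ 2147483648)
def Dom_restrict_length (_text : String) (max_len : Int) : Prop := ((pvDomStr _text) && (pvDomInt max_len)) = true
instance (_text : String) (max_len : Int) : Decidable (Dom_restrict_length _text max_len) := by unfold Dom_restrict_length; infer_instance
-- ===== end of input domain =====

-- B replaces A's concatenate-while-scanning loop with a word-count/prefix-sum table, a cutoff search, and one slice+join; alternative decomposition, same cost.


-- ===== PORT A =====
-- the for-loop with its break; final_text carried as List Char (String ++ is opaque to the kernel)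
def restrictLoopA (max_len : Int) : List (List Char) → List Char → Int → List Char
  | [], final_text, _ => final_text
  | sentence :: rest, final_text, total_len =>
      let sent_len : Int := ((PySem.Chars.split₀ sentence).length : Int)
      let total_len := total_len + sent_len
      if total_len > max_len then final_text
      else restrictLoopA max_len rest (final_text ++ sentence ++ [' ']) total_len

def restrict_length (_text : String) (max_len : Int) : String :=
  let sentences := PySem.Chars.splitOn _text.toList "::;".toList
  String.ofList (PySem.Chars.strip (restrictLoopA max_len sentences [] 0))

-- ===== PORT B =====
-- running prefix sums of the word counts (the sums list Source B builds)
def pvPrefixSums : List Int → Int → List Int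
  | [], _ => []
  | c :: r, run => (run + c) :: pvPrefixSums r (run + c)

-- first index whose prefix sum exceeds max_len, else the length
def pvCutoff : List Int → Int → Nat
  | [], _ => 0
  | t :: r, m => if t > m then 0 else pvCutoff r m + 1

def restrict_length_alt (_text : String) (max_len : Int) : String :=
  let sentences := PySem.Chars.splitOn _text.toList "::;".toList
  let counts := sentences.map (fun s => ((PySem.Chars.split₀ s).length : Int))
  let sums := pvPrefixSums counts 0
  let i := pvCutoff sums max_len
  String.ofList (PySem.Chars.strip (PySem.Chars.join " ".toList (sentences.take i)))

-- ===== PRECONDITION & SPEC =====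
def Spec_restrict_length (_text : String) (max_len : Int) (out : String) : Prop := out = restrict_length_alt _text max_len
instance (_text : String) (max_len : Int) (out : String) : Decidable (Spec_restrict_length _text max_len out) := by unfold Spec_restrict_length; infer_instance

-- ===== CLAIM (what is proved, stated in full; the proofs are below) =====
def Claim_equal_restrict_length : Prop := ∀ (_text : String) (max_len : Int), Dom_restrict_length _text max_len → Spec_restrict_length _text max_len (restrict_length _text max_len)

-- ===== LEMMAS AND PROOFS =====

-- budget-passing cutoff over the counts themselves (proof intermediary)
def cutC : List Int → Int → Nat
  | [], _ => 0
  | c :: r, m => if c > m then 0 else cutC r (m - c) + 1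

theorem cutoff_prefix (cs : List Int) (run m : Int) :
    pvCutoff (pvPrefixSums cs run) m = cutC cs (m - run) := by
  induction cs generalizing run with
  | nil => simp [pvPrefixSums, pvCutoff, cutC]
  | cons c r ih =>
      simp only [pvPrefixSums, pvCutoff, cutC]
      by_cases h : run + c > m
      · rw [if_pos h, if_pos (by omega)]
      · rw [if_neg h, if_neg (by omega), ih]
        have harg : m - (run + c) = m - run - c := by omega
        rw [harg]

theorem rstrip_append_space (y : List Char) :
    PySem.Chars.rstrip (y ++ [' ']) = PySem.Chars.rstrip y := by
  simp only [PySem.Chars.rstrip, List.reverse_append, List.reverse_cons, List.reverse_nil,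
    List.nil_append, List.cons_append]
  rw [List.dropWhile_cons_of_pos (by decide)]

theorem strip_append_space (y : List Char) :
    PySem.Chars.strip (y ++ [' ']) = PySem.Chars.strip y := by
  simp only [PySem.Chars.strip, PySem.Chars.lstrip, List.dropWhile_append]
  split
  · next h =>
      rw [List.isEmpty_iff] at h
      rw [h]
      rw [List.dropWhile_cons_of_pos (by decide)]
      rfl
  · exact rstrip_append_space _

theorem flatten_map_space (xs : List (List Char)) (x : List Char) :
    ((x :: xs).map (fun s => s ++ [' '])).flatten =
      List.intercalate [' '] (x :: xs) ++ [' '] := by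
  induction xs generalizing x with
  | nil => simp [List.intercalate]
  | cons y ys ih =>
      simp only [List.map_cons, List.flatten_cons] at ih ⊢
      rw [ih y]
      simp [List.intercalate, List.intersperse]

theorem strip_flat_eq (xs : List (List Char)) :
    PySem.Chars.strip ((xs.map (fun s => s ++ [' '])).flatten) =
      PySem.Chars.strip (PySem.Chars.join [' '] xs) := by
  cases xs with
  | nil => simp [PySem.Chars.join, List.intercalate]
  | cons x r =>
      rw [flatten_map_space, PySem.Chars.join, strip_append_space]

theorem loopA_eq (max_len : Int) (sents : List (List Char)) (ft : List Char) (total : Int) :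
    restrictLoopA max_len sents ft total =
      ft ++ ((sents.take (cutC (sents.map (fun s => ((PySem.Chars.split₀ s).length : Int)))
        (max_len - total))).map (fun s => s ++ [' '])).flatten := by
  induction sents generalizing ft total with
  | nil => simp [restrictLoopA, cutC]
  | cons s r ih =>
      simp only [restrictLoopA, List.map_cons, cutC]
      by_cases h : total + ((PySem.Chars.split₀ s).length : Int) > max_len
      · rw [if_pos h, if_pos (by omega)]
        simp
      · rw [if_neg h, if_neg (by omega), ih]
        have harg : max_len - (total + ((PySem.Chars.split₀ s).length : Int))
            = max_len - total - ((PySem.Chars.split₀ s).length : Int) := by omega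
        rw [harg]
        simp [List.append_assoc]

theorem restrict_length_eq_alt (_text : String) (max_len : Int) :
    restrict_length _text max_len = restrict_length_alt _text max_len := by
  unfold restrict_length restrict_length_alt
  dsimp only
  rw [loopA_eq, cutoff_prefix]
  simp only [List.nil_append, sub_zero]
  rw [strip_flat_eq]
  rfl

-- ===== VERDICT (by name: the statement is the Claim_ definition above) =====
theorem restrict_length_spec : Claim_equal_restrict_length := by
  intro _text max_len _
  unfold Spec_restrict_length
  exact restrict_length_eq_alt _text max_len
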